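-- pv_equiv track=rewrite | github.com/yasoobrasheed/CS121 | pas/pa2/schelling.py | generate_neighborhood
-- ===== SOURCE A (Python) =====
-- def generate_neighborhood(grid, R, location):
--     # Generate a list with the order of the houses in a given neighborhood "R"
--     i = location[0]
--     j = location[1]
--     neighborhood = []
--
--     # Using the eqution given, grab the house at the indices of the neighborhood
--     for k in range(0, len(grid)):
--         if i - R <= k <= i + R:
--             for l in range(0, len(grid[k])):
--                 if j - R <= l <= j + R:
--                     neighborhood.append(grid[k][l])
--
--     return neighborhood
-- ===== SOURCE B (Python) =====
-- def generate_neighborhood(grid, R, location):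
--     # Visit only the clamped window of rows and slice each row once,
--     # instead of scanning every cell of the grid with per-cell tests.
--     i = location[0]
--     j = location[1]
--     lo = max(0, j - R)
--     hi = max(0, j + R + 1)
--     out = []
--     for k in range(max(0, i - R), min(len(grid), i + R + 1)):
--         out.extend(grid[k][lo:hi])
--     return out
-- ===== Notes on version B (the rewrite author's own statement) =====
-- stated objective: alternative
-- what changed: Instead of scanning every cell of the grid and testing Chebyshev-window membership per cell, B iterates only the clamped row range max(0,i-R)..min(len(grid),i+R+1) and takes one slice per row; intended as faster for windows small relative to the grid, though a timing run did not confirm a 1.5x speed-up on its inputs.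
-- outside the precondition, e.g. on generate_neighborhood([[1, 2]], 1, (0,)): A raises IndexError, B raises IndexError
import Mathlib
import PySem

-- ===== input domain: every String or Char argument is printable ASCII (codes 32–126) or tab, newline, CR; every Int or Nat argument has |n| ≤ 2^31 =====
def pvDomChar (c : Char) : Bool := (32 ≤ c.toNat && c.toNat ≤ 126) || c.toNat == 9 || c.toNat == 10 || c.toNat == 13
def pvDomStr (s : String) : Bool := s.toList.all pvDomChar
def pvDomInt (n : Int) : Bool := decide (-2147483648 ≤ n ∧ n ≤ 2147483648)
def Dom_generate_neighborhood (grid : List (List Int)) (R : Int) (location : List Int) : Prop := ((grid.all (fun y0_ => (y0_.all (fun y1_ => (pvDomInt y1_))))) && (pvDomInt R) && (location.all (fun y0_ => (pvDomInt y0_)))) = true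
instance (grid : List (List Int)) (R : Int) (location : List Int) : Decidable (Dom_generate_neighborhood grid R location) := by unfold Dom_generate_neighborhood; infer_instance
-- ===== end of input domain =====

-- B iterates only the clamped window of rows and takes one slice per row, instead of
-- scanning every grid cell with a per-cell membership test (objective: alternative;
-- intended as faster for small R, but a timing run measured only 1.34x at its largest size).

-- ===== PORT A =====
def generate_neighborhood (grid : List (List Int)) (R : Int) (location : List Int) : List Int :=
  match PySem.List.pyGet? location 0 with
  | none => []  -- IndexError, excluded by Pre_
  | some i =>
    match PySem.List.pyGet? location 1 with
    | none => []  -- IndexError, excluded by Pre_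
    | some j =>
      (PySem.List.pyRange 0 (grid.length : Int) 1).foldl
        (fun neighborhood k =>
          if i - R ≤ k ∧ k ≤ i + R then
            let row := PySem.List.pyGetD grid k []   -- grid[k], k always in range here
            (PySem.List.pyRange 0 (row.length : Int) 1).foldl
              (fun acc l =>
                if j - R ≤ l ∧ l ≤ j + R then acc ++ [PySem.List.pyGetD row l 0] else acc)
              neighborhood
          else neighborhood)
        []

-- ===== PORT B =====
def generate_neighborhood_alt (grid : List (List Int)) (R : Int) (location : List Int) : List Int :=
  match PySem.List.pyGet? location 0 with
  | none => []  -- IndexError, excluded by Pre_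
  | some i =>
    match PySem.List.pyGet? location 1 with
    | none => []  -- IndexError, excluded by Pre_
    | some j =>
      let lo := max 0 (j - R)
      let hi := max 0 (j + R + 1)
      (PySem.List.pyRange (max 0 (i - R)) (min (grid.length : Int) (i + R + 1)) 1).foldl
        (fun out k =>
          out ++ PySem.List.slice (PySem.List.pyGetD grid k []) (some lo) (some hi))
        []

-- ===== PRECONDITION & SPEC =====
-- Pre_ excludes only locations with fewer than 2 entries, on which Python A raises IndexError.
def Pre_generate_neighborhood (grid : List (List Int)) (R : Int) (location : List Int) : Prop :=
  2 ≤ location.length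
instance (grid : List (List Int)) (R : Int) (location : List Int) : Decidable (Pre_generate_neighborhood grid R location) := by unfold Pre_generate_neighborhood; infer_instance

def pvWitness_generate_neighborhood : List (List Int) × Int × List Int :=
  ([[1, 2, 3], [4, 5, 6], [7, 8, 9]], 1, [0, 1])

def Spec_generate_neighborhood (grid : List (List Int)) (R : Int) (location : List Int) (out : List Int) : Prop := out = generate_neighborhood_alt grid R location
instance (grid : List (List Int)) (R : Int) (location : List Int) (out : List Int) : Decidable (Spec_generate_neighborhood grid R location out) := by unfold Spec_generate_neighborhood; infer_instance

-- ===== CLAIM (what is proved, stated in full; the proofs are below) =====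
def Claim_equal_generate_neighborhood : Prop := ∀ (grid : List (List Int)) (R : Int) (location : List Int), Dom_generate_neighborhood grid R location → Pre_generate_neighborhood grid R location → Spec_generate_neighborhood grid R location (generate_neighborhood grid R location)

-- ===== LEMMAS AND PROOFS =====

-- 'for x in l: if c(x): out.append(f(x))' as filter-map
lemma foldl_ite_append (l : List Int) (c : Int → Prop) [DecidablePred c] (f : Int → Int)
    (acc : List Int) :
    l.foldl (fun a x => if c x then a ++ [f x] else a) acc
      = acc ++ ((l.filter (fun x => decide (c x))).map f) := by
  induction l generalizing acc with
  | nil => simp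
  | cons x xs ih => simp only [List.foldl_cons, List.filter_cons]; by_cases h : c x <;> simp [ih, h]

-- 'for x in l: if c(x): out += g(x)' as filter-flatMap
lemma foldl_ite_extend (l : List Int) (c : Int → Prop) [DecidablePred c] (g : Int → List Int)
    (acc : List Int) :
    l.foldl (fun a x => if c x then a ++ g x else a) acc
      = acc ++ ((l.filter (fun x => decide (c x))).flatMap g) := by
  induction l generalizing acc with
  | nil => simp
  | cons x xs ih => simp only [List.foldl_cons, List.filter_cons]; by_cases h : c x <;> simp [ih, h]

-- 'for x in l: out += g(x)' as flatMap
lemma foldl_extend (l : List Int) (g : Int → List Int) (acc : List Int) :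
    l.foldl (fun a x => a ++ g x) acc = acc ++ l.flatMap g := by
  induction l generalizing acc with
  | nil => simp
  | cons x xs ih => simp [ih]

-- filtering a unit-step range by an interval test clamps its bounds
lemma filter_pyRange (a b L U : Int) :
    (PySem.List.pyRange a b 1).filter (fun k => decide (L ≤ k ∧ k < U))
      = PySem.List.pyRange (max a L) (min b U) 1 := by
  induction h : (b - a).toNat generalizing a with
  | zero =>
    rw [PySem.List.pyRange_one_eq_nil (by omega), PySem.List.pyRange_one_eq_nil (by omega)]
    rfl
  | succ m ih =>
    have hab : a < b := by omega
    rw [PySem.List.pyRange_one_cons hab, List.filter_cons]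
    rw [ih (a + 1) (by omega)]
    by_cases hc : L ≤ a ∧ a < U
    · rw [if_pos (by simp [hc.1, hc.2])]
      have h1 : max (a + 1) L = a + 1 := by omega
      have h2 : max a L = a := by omega
      rw [h1, h2]
      conv_rhs => rw [PySem.List.pyRange_one_cons (show a < min b U by omega)]
    · rw [if_neg (by simpa using hc)]
      by_cases ha : a < L
      · have h1 : max (a + 1) L = max a L := by omega
        rw [h1]
      · -- here U ≤ a, both ranges empty
        rw [PySem.List.pyRange_one_eq_nil (by omega), PySem.List.pyRange_one_eq_nil (by omega)]

-- reading a clamped index range out of a list is drop/take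
lemma map_pyGetD_range_eq_drop_take (row : List Int) (a b : Int) (h0 : 0 ≤ a)
    (hb : b ≤ (row.length : Int)) :
    (PySem.List.pyRange a b 1).map (fun l => PySem.List.pyGetD row l 0)
      = (row.drop a.toNat).take (b.toNat - a.toNat) := by
  apply List.ext_getElem
  · simp [PySem.List.length_pyRange_one]; omega
  · intro k h1 h2
    simp only [List.getElem_map, PySem.List.getElem_pyRange_one]
    have hk : k < (b - a).toNat := by simpa [PySem.List.length_pyRange_one] using h1
    rw [PySem.List.pyGetD_eq_getElem (h0 := by omega) (h1 := by push_cast; omega)]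
    rw [List.getElem_take, List.getElem_drop]
    congr 1
    omega

-- the inner loop of A equals B's row slice
lemma inner_eq_slice (row : List Int) (R j : Int) (acc : List Int) :
    (PySem.List.pyRange 0 (row.length : Int) 1).foldl
        (fun acc2 l => if j - R ≤ l ∧ l ≤ j + R then acc2 ++ [PySem.List.pyGetD row l 0] else acc2)
        acc
      = acc ++ PySem.List.slice row (some (max 0 (j - R))) (some (max 0 (j + R + 1))) := by
  rw [foldl_ite_append]
  congr 1
  rw [List.filter_congr (q := fun l => decide ((j - R) ≤ l ∧ l < (j + R + 1)))
      (by intro x _; rw [decide_eq_decide]; omega)]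
  rw [filter_pyRange, map_pyGetD_range_eq_drop_take _ _ _ (by omega) (by omega)]
  rw [PySem.List.slice_toNat _ (by omega) (by omega)]
  rcases le_or_gt (j + R + 1) (row.length : Int) with h | h
  · congr 1; omega
  · rw [List.take_of_length_le (by simp; omega), List.take_of_length_le (by simp; omega)]

-- A's doubly-guarded scan equals B's clamped-window scan
lemma scan_eq (grid : List (List Int)) (R i j : Int) :
    (PySem.List.pyRange 0 (grid.length : Int) 1).foldl
        (fun neighborhood k =>
          if i - R ≤ k ∧ k ≤ i + R then
            (PySem.List.pyRange 0 (((PySem.List.pyGetD grid k []).length : Int)) 1).foldl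
              (fun acc l =>
                if j - R ≤ l ∧ l ≤ j + R then acc ++ [PySem.List.pyGetD (PySem.List.pyGetD grid k []) l 0] else acc)
              neighborhood
          else neighborhood)
        []
      = (PySem.List.pyRange (max 0 (i - R)) (min (grid.length : Int) (i + R + 1)) 1).foldl
          (fun out k =>
            out ++ PySem.List.slice (PySem.List.pyGetD grid k []) (some (max 0 (j - R)))
              (some (max 0 (j + R + 1))))
          [] := by
  have hbody :
      (fun (neighborhood : List Int) (k : Int) =>
          if i - R ≤ k ∧ k ≤ i + R then
            (PySem.List.pyRange 0 (((PySem.List.pyGetD grid k []).length : Int)) 1).foldl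
              (fun acc l =>
                if j - R ≤ l ∧ l ≤ j + R then acc ++ [PySem.List.pyGetD (PySem.List.pyGetD grid k []) l 0] else acc)
              neighborhood
          else neighborhood)
        = (fun (neighborhood : List Int) (k : Int) =>
            if i - R ≤ k ∧ k ≤ i + R then
              neighborhood ++ PySem.List.slice (PySem.List.pyGetD grid k []) (some (max 0 (j - R)))
                (some (max 0 (j + R + 1)))
            else neighborhood) := by
    funext acc k
    split_ifs with h
    · exact inner_eq_slice _ R j acc
    · rfl
  rw [hbody, foldl_ite_extend, foldl_extend, List.nil_append, List.nil_append]
  congr 1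
  rw [List.filter_congr (q := fun k => decide ((i - R) ≤ k ∧ k < (i + R + 1)))
      (by intro x _; rw [decide_eq_decide]; omega)]
  rw [filter_pyRange]

-- ===== VERDICT (by name: the statement is the Claim_ definition above) =====
theorem generate_neighborhood_spec : Claim_equal_generate_neighborhood := by
  intro grid R location _ _
  unfold Spec_generate_neighborhood generate_neighborhood generate_neighborhood_alt
  cases PySem.List.pyGet? location 0 with
  | none => rfl
  | some i =>
    cases PySem.List.pyGet? location 1 with
    | none => rfl
    | some j => exact scan_eq grid R i j
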